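-- pv_equiv track=rewrite | github.com/RitaLi1005/SAPS | transformer_utils/irepair/util/modularization_util.py | collect_removed_neurons_layer_wise_without_val
-- ===== SOURCE A (Python) =====
-- def collect_removed_neurons_layer_wise_without_val(si, removeNum, layerNames):
--     d = {}
--     cc = 0
--     for i, j, v in si:
--         if layerNames[i].endswith('lm_head') or layerNames[i].endswith('embed_out'):
--             continue
--         if layerNames[i] not in d:
--             d[layerNames[i]] = []
--
--         if cc < removeNum:
--             d[layerNames[i]].append(j)
--             cc += 1
--     return d
-- ===== SOURCE B (Python) =====
-- def collect_removed_neurons_layer_wise_without_val(si, removeNum, layerNames):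
--     rows = [(layerNames[i], j) for i, j, _ in si
--             if not (layerNames[i].endswith('lm_head') or layerNames[i].endswith('embed_out'))]
--     taken = rows[:removeNum] if removeNum > 0 else []
--     return {name: [j for n, j in taken if n == name]
--             for name in dict.fromkeys(n for n, _ in rows)}
-- ===== Notes on version B (the rewrite author's own statement) =====
-- stated objective: alternative
-- what changed: A's single stateful loop (dict mutation plus a running counter gating each append) is replaced by a group-by: the surviving (name, j) rows are listed once, the first removeNum of them form the quota prefix, and each layer's list is computed independently by an inner scan of that prefix filtered on the layer name (no mutation, no counter).
import Mathlib
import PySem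

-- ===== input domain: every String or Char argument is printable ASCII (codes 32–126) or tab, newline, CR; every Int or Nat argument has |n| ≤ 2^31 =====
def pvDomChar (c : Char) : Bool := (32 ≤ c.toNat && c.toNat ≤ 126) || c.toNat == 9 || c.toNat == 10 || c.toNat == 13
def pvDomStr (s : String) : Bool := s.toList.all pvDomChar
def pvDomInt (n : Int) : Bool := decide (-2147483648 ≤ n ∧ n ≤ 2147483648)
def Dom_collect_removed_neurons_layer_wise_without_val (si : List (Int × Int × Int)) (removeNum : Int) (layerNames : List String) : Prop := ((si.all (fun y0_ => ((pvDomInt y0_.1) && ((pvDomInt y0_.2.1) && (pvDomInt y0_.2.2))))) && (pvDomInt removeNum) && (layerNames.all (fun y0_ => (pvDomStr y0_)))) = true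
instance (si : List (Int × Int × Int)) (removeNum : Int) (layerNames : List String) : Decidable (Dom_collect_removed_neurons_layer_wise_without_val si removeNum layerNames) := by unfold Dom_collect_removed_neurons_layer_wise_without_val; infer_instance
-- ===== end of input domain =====

-- B replaces A's single stateful loop (dict mutation + a counter gating each append) by a group-by:
-- list the surviving (name, j) rows, take the first removeNum as the quota prefix, and build each
-- layer's list by an independent scan of that prefix (objective: alternative algorithm, same result).

-- ===== PORT A =====
-- shared helper: layerNames[i] (Python indexing, negative indices wrap); the getD "" default is
-- only a totality guard — Pre_ keeps every index in range, where pyGet? is exact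
def pvNameAt (layerNames : List String) (i : Int) : String :=
  (PySem.List.pyGet? layerNames i).getD ""

def collect_removed_neurons_layer_wise_without_val (si : List (Int × Int × Int)) (removeNum : Int) (layerNames : List String) : List (String × List Int) :=
  (si.foldl
    (fun (st : PySem.Dict String (List Int) × Int) (t : Int × Int × Int) =>
      if PySem.Str.endswith (pvNameAt layerNames t.1) "lm_head"
          || PySem.Str.endswith (pvNameAt layerNames t.1) "embed_out" then st
      else
        let d := if st.1.contains (pvNameAt layerNames t.1) then st.1
                 else st.1.insert (pvNameAt layerNames t.1) ([] : List Int)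
        if st.2 < removeNum then (d.modify (pvNameAt layerNames t.1) [] (fun l => l ++ [t.2.1]), st.2 + 1)
        else (d, st.2))
    (PySem.Dict.empty, 0)).1.items

-- ===== PORT B =====
def collect_removed_neurons_layer_wise_without_val_alt (si : List (Int × Int × Int)) (removeNum : Int) (layerNames : List String) : List (String × List Int) :=
  let rows : List (String × Int) := si.filterMap
    (fun (t : Int × Int × Int) =>
      if PySem.Str.endswith (pvNameAt layerNames t.1) "lm_head"
          || PySem.Str.endswith (pvNameAt layerNames t.1) "embed_out" then none
      else some (pvNameAt layerNames t.1, t.2.1))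
  let taken : List (String × Int) :=
    if 0 < removeNum then PySem.List.slice rows none (some removeNum) else []
  -- dict.fromkeys over the row names = ordered dedup (PySem.List.dedup)
  let names : List String := PySem.List.dedup (rows.map Prod.fst)
  -- the dict comprehension {name: [...] for name in names}
  (names.foldl
    (fun (d : PySem.Dict String (List Int)) (name : String) =>
      d.insert name ((taken.filter (fun p => p.1 == name)).map Prod.snd))
    PySem.Dict.empty).items

-- ===== PRECONDITION & SPEC =====
-- Pre_ excludes exactly the inputs where Python A raises IndexError: some row's layer index i
-- is out of range for layerNames.
def Pre_collect_removed_neurons_layer_wise_without_val (si : List (Int × Int × Int)) (removeNum : Int) (layerNames : List String) : Prop :=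
  ∀ t ∈ si, PySem.Raise.InRange layerNames.length t.1
instance (si : List (Int × Int × Int)) (removeNum : Int) (layerNames : List String) : Decidable (Pre_collect_removed_neurons_layer_wise_without_val si removeNum layerNames) := by unfold Pre_collect_removed_neurons_layer_wise_without_val; infer_instance

def pvWitness_collect_removed_neurons_layer_wise_without_val : (List (Int × Int × Int)) × Int × List String :=
  ([(0, 3, 2), (1, 4, 2), (0, 5, 1)], 2, ["conv", "fc"])

def Spec_collect_removed_neurons_layer_wise_without_val (si : List (Int × Int × Int)) (removeNum : Int) (layerNames : List String) (out : List (String × List Int)) : Prop := out = collect_removed_neurons_layer_wise_without_val_alt si removeNum layerNames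
instance (si : List (Int × Int × Int)) (removeNum : Int) (layerNames : List String) (out : List (String × List Int)) : Decidable (Spec_collect_removed_neurons_layer_wise_without_val si removeNum layerNames out) := by unfold Spec_collect_removed_neurons_layer_wise_without_val; infer_instance

-- ===== CLAIM (what is proved, stated in full; the proofs are below) =====
def Claim_equal_collect_removed_neurons_layer_wise_without_val : Prop := ∀ (si : List (Int × Int × Int)) (removeNum : Int) (layerNames : List String), Dom_collect_removed_neurons_layer_wise_without_val si removeNum layerNames → Pre_collect_removed_neurons_layer_wise_without_val si removeNum layerNames → Spec_collect_removed_neurons_layer_wise_without_val si removeNum layerNames (collect_removed_neurons_layer_wise_without_val si removeNum layerNames)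

-- ===== LEMMAS AND PROOFS =====

-- names for the loop bodies of A's port, used only by the proofs
def pvVStep (removeNum : Int) (st : PySem.Dict String (List Int) × Int) (p : String × Int) : PySem.Dict String (List Int) × Int :=
  let d := if st.1.contains p.1 then st.1 else st.1.insert p.1 ([] : List Int)
  if st.2 < removeNum then (d.modify p.1 [] (fun l => l ++ [p.2]), st.2 + 1) else (d, st.2)

def pvInsAbs (d : PySem.Dict String (List Int)) (p : String × Int) : PySem.Dict String (List Int) :=
  if d.contains p.1 then d else d.insert p.1 ([] : List Int)

def pvIns (d : PySem.Dict String (List Int)) (p : String × Int) : PySem.Dict String (List Int) :=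
  d.insert p.1 ([] : List Int)

def pvMod (d : PySem.Dict String (List Int)) (p : String × Int) : PySem.Dict String (List Int) :=
  d.modify p.1 [] (fun l => l ++ [p.2])

-- A's fold over si is the fold of pvVStep over the filtered pair list B builds
theorem pv_fold_filterMap (si : List (Int × Int × Int)) (removeNum : Int) (layerNames : List String) (init : PySem.Dict String (List Int) × Int) :
    si.foldl
      (fun (st : PySem.Dict String (List Int) × Int) (t : Int × Int × Int) =>
        if PySem.Str.endswith (pvNameAt layerNames t.1) "lm_head"
            || PySem.Str.endswith (pvNameAt layerNames t.1) "embed_out" then st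
        else
          let d := if st.1.contains (pvNameAt layerNames t.1) then st.1
                   else st.1.insert (pvNameAt layerNames t.1) ([] : List Int)
          if st.2 < removeNum then (d.modify (pvNameAt layerNames t.1) [] (fun l => l ++ [t.2.1]), st.2 + 1)
          else (d, st.2))
      init
    = (si.filterMap
        (fun (t : Int × Int × Int) =>
          if PySem.Str.endswith (pvNameAt layerNames t.1) "lm_head"
              || PySem.Str.endswith (pvNameAt layerNames t.1) "embed_out" then none
          else some (pvNameAt layerNames t.1, t.2.1))).foldl (pvVStep removeNum) init := by
  rw [List.foldl_filterMap]
  congr 1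
  funext st t
  by_cases h : (PySem.Str.endswith (pvNameAt layerNames t.1) "lm_head"
      || PySem.Str.endswith (pvNameAt layerNames t.1) "embed_out") = true
  · simp only [if_pos h]
  · simp only [if_neg h, pvVStep]

-- two inserts at distinct keys, the first overwriting, the second appending, commute as item lists
theorem pv_insert_swap (d : PySem.Dict String (List Int)) (p q : String) (v w : List Int)
    (hp : d.contains p = true) (hq : d.contains q = false) :
    (d.insert p v).insert q w = (d.insert q w).insert p v := by
  have hne : ¬ (q = p) := by rintro rfl; rw [hp] at hq; cases hq
  have hcq : (d.insert p v).contains q = false := by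
    rw [PySem.Dict.contains_insert]
    simpa [hne] using hq
  have hcp : (d.insert q w).contains p = true := by
    rw [PySem.Dict.contains_insert, hp]
    simp
  have hov : ∀ e : PySem.Dict String (List Int), e.contains p = true →
      (e.insert p v).items = e.items.map (fun a => if a.1 = p then (p, v) else a) := by
    intro e he
    simp [PySem.Dict.insert, he]
  have happ : ∀ e : PySem.Dict String (List Int), e.contains q = false →
      (e.insert q w).items = e.items ++ [(q, w)] := by
    intro e he
    simp [PySem.Dict.insert, he]
  apply PySem.Dict.ext
  rw [happ _ hcq, hov _ hp, hov _ hcp, happ _ hq, List.map_append]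
  simp [hne]

-- appending to an existing key commutes with any later run of insert-if-absent steps
theorem pv_comm (l : List (String × Int)) :
    ∀ (d : PySem.Dict String (List Int)) (p : String × Int), d.contains p.1 = true →
      l.foldl pvInsAbs (pvMod d p) = pvMod (l.foldl pvInsAbs d) p := by
  induction l with
  | nil => intro d p _; rfl
  | cons q l ih =>
    intro d p hp
    simp only [List.foldl_cons]
    have hcont : (pvMod d p).contains q.1 = d.contains q.1 := by
      simp [pvMod, PySem.Dict.modify, PySem.Dict.contains_insert]
      intro h; rw [h]; exact hp
    by_cases hq : d.contains q.1 = true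
    · rw [show pvInsAbs (pvMod d p) q = pvMod d p by simp [pvInsAbs, hcont, hq],
        show pvInsAbs d q = d by simp [pvInsAbs, hq]]
      exact ih d p hp
    · have hq' : d.contains q.1 = false := by simpa using hq
      have hne : ¬ (p.1 = q.1) := by rintro h; rw [← h] at hq'; rw [hp] at hq'; cases hq'
      have swap : (pvMod d p).insert q.1 [] = pvMod (d.insert q.1 []) p := by
        simp only [pvMod, PySem.Dict.modify]
        rw [PySem.Dict.getD_insert_of_ne d ([] : List Int) ([] : List Int) hne]
        exact pv_insert_swap d p.1 q.1 _ ([] : List Int) hp hq'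
      have l1 : pvInsAbs (pvMod d p) q = (pvMod d p).insert q.1 [] := by
        simp [pvInsAbs, hcont, hq']
      have l2 : pvInsAbs d q = d.insert q.1 [] := by
        simp [pvInsAbs, hq']
      rw [l1, l2, swap]
      have hp' : (d.insert q.1 []).contains p.1 = true := by
        simp [PySem.Dict.contains_insert, hp]
      rw [ih (d.insert q.1 []) p hp']

-- the interleaved fold splits into the key-registration fold followed by the append fold over a prefix
theorem pv_split (removeNum : Int) (l : List (String × Int)) :
    ∀ (d : PySem.Dict String (List Int)) (cc : Int),
      (l.foldl (pvVStep removeNum) (d, cc)).1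
        = (l.take (removeNum - cc).toNat).foldl pvMod (l.foldl pvInsAbs d) := by
  induction l with
  | nil => intro d cc; simp
  | cons p l ih =>
    intro d cc
    by_cases h : cc < removeNum
    · have hk : (removeNum - cc).toNat = (removeNum - (cc + 1)).toNat + 1 := by omega
      have hstep : pvVStep removeNum (d, cc) p = (pvMod (pvInsAbs d p) p, cc + 1) := by
        simp [pvVStep, pvInsAbs, pvMod, h]
      have hcp : (pvInsAbs d p).contains p.1 = true := by
        by_cases hc : d.contains p.1 = true
        · simp [pvInsAbs, hc]
        · have hc' : d.contains p.1 = false := by simpa using hc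
          simp [pvInsAbs, hc']
      simp only [List.foldl_cons, hstep, hk, List.take_succ_cons]
      rw [ih (pvMod (pvInsAbs d p) p) (cc + 1), pv_comm l (pvInsAbs d p) p hcp]
    · have hk : (removeNum - cc).toNat = 0 := by omega
      have hstep : pvVStep removeNum (d, cc) p = (pvInsAbs d p, cc) := by
        simp [pvVStep, pvInsAbs, h]
      simp only [List.foldl_cons, hstep, hk, List.take_zero]
      have := ih (pvInsAbs d p) cc
      rw [show (removeNum - cc).toNat = 0 from hk] at this
      simpa using this

-- over a dict whose values are all [], insert-if-absent and overwrite-insert of [] coincide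
theorem pv_insAbs_eq (l : List (String × Int)) :
    ∀ (d : PySem.Dict String (List Int)), (∀ q ∈ d.items, q.2 = ([] : List Int)) →
      l.foldl pvInsAbs d = l.foldl pvIns d := by
  induction l with
  | nil => intro d _; rfl
  | cons p l ih =>
    intro d hd
    simp only [List.foldl_cons]
    by_cases hc : d.contains p.1 = true
    · have hid : d.insert p.1 ([] : List Int) = d := by
        apply PySem.Dict.ext
        simp only [PySem.Dict.insert, hc, if_true]
        rw [List.map_congr_left, List.map_id]
        intro a ha
        by_cases hk : a.1 == p.1
        · have h1 : a.1 = p.1 := eq_of_beq hk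
          have h2 : a.2 = ([] : List Int) := hd a ha
          simp [← h1, ← h2]
        · simp [hk]
      rw [show pvInsAbs d p = d by simp [pvInsAbs, hc], show pvIns d p = d by simp [pvIns, hid]]
      exact ih d hd
    · have hc' : d.contains p.1 = false := by simpa using hc
      rw [show pvInsAbs d p = pvIns d p by simp [pvInsAbs, pvIns, hc']]
      apply ih
      intro q hq
      simp only [pvIns, PySem.Dict.insert, hc'] at hq
      rcases List.mem_append.mp hq with h | h
      · exact hd q h
      · simp only [List.mem_singleton] at h
        rw [h]

-- every value stored by the pvIns fold is [], so any getD with default [] returns []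
theorem pv_getD_insNil (l : List (String × Int)) :
    ∀ (d : PySem.Dict String (List Int)), (∀ q ∈ d.items, q.2 = ([] : List Int)) →
      ∀ n, (l.foldl pvIns d).getD n ([] : List Int) = ([] : List Int) := by
  induction l with
  | nil =>
    intro d hd n
    simp only [List.foldl_nil]
    rcases h : d.get? n with _ | v
    · exact PySem.Dict.getD_of_get?_eq_none d ([] : List Int) h
    · rw [PySem.Dict.getD_of_get?_eq_some d ([] : List Int) h]
      exact hd (n, v) (PySem.Dict.mem_items_of_get?_eq_some d h)
  | cons p l ih =>
    intro d hd n
    simp only [List.foldl_cons]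
    apply ih
    intro q hq
    simp only [pvIns] at hq
    rcases (PySem.Dict.mem_items_insert _ _ _ _).mp hq with h | h
    · rw [h]
    · exact hd q h.1

-- the split A-side folds compute exactly B's group-by dict
theorem pv_main (rows : List (String × Int)) (k : Nat) :
    ((rows.take k).foldl pvMod (rows.foldl pvIns PySem.Dict.empty)).items
      = ((PySem.List.dedup (rows.map Prod.fst)).foldl
          (fun (d : PySem.Dict String (List Int)) (name : String) =>
            d.insert name (((rows.take k).filter (fun p => p.1 == name)).map Prod.snd))
          PySem.Dict.empty).items := by
  have hmodlam : ∀ (l : List (String × Int)) (d : PySem.Dict String (List Int)),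
      l.foldl pvMod d = l.foldl (fun d p => d.modify p.1 ([] : List Int) (fun x => x ++ [p.2])) d :=
    fun _ _ => rfl
  have hinslam : ∀ (l : List (String × Int)) (d : PySem.Dict String (List Int)),
      l.foldl pvIns d = l.foldl (fun d p => d.insert p.1 ([] : List Int)) d :=
    fun _ _ => rfl
  have hnodD : (rows.foldl pvIns PySem.Dict.empty).keys.Nodup := by
    rw [hinslam]
    exact PySem.Dict.nodup_keys_foldl_insert_key rows Prod.fst (fun _ _ => ([] : List Int))
      PySem.Dict.empty (by simp)
  have hkeysD : (rows.foldl pvIns PySem.Dict.empty).keys = PySem.List.dedup (rows.map Prod.fst) := by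
    rw [hinslam]
    rw [PySem.Dict.keys_foldl_insert_key]
    simp [PySem.Set.update_nil_left]
  have hkeysF : ((rows.take k).foldl pvMod (rows.foldl pvIns PySem.Dict.empty)).keys
      = (rows.foldl pvIns PySem.Dict.empty).keys := by
    rw [hmodlam]
    rw [PySem.Dict.keys_foldl_modify_key]
    rw [PySem.Set.update_eq_append_filter]
    have hnil : (PySem.Set.ofList ((rows.take k).map Prod.fst)).filter
        (fun y => !(PySem.Set.contains (rows.foldl pvIns PySem.Dict.empty).keys y)) = [] := by
      rw [List.filter_eq_nil_iff]
      intro x hx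
      have hxm : x ∈ (rows.take k).map Prod.fst := (PySem.Set.mem_ofList _ _).mp hx
      have hxr : x ∈ rows.map Prod.fst := by
        rcases List.mem_map.mp hxm with ⟨p, hp, rfl⟩
        exact List.mem_map_of_mem (List.take_subset _ _ hp)
      have hmem : x ∈ (rows.foldl pvIns PySem.Dict.empty).keys := by
        rw [hkeysD]
        simpa [PySem.Set.mem_ofList] using hxr
      simpa using hmem
    rw [hnil, List.append_nil]
  have hnodF : ((rows.take k).foldl pvMod (rows.foldl pvIns PySem.Dict.empty)).keys.Nodup := by
    rw [hkeysF]; exact hnodD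
  rw [PySem.Dict.items_eq_map_keys _ hnodF ([] : List Int)]
  rw [hkeysF, hkeysD]
  rw [PySem.Dict.items_foldl_insert_fresh (PySem.List.dedup (rows.map Prod.fst)) (fun n => n)
    (fun name => (((rows.take k).filter (fun p => p.1 == name)).map Prod.snd)) PySem.Dict.empty
    (by intro a _; simp) (by simp)]
  rw [show (PySem.Dict.empty : PySem.Dict String (List Int)).items = [] from rfl, List.nil_append]
  apply List.map_congr_left
  intro n _
  have h1 : ((rows.take k).foldl pvMod (rows.foldl pvIns PySem.Dict.empty)).getD n ([] : List Int)
      = (rows.foldl pvIns PySem.Dict.empty).getD n ([] : List Int)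
        ++ ((rows.take k).filter (fun p => p.1 == n)).map Prod.snd := by
    rw [hmodlam]
    exact PySem.Dict.getD_foldl_modify_append ..
  have h2 : (rows.foldl pvIns PySem.Dict.empty).getD n ([] : List Int) = [] :=
    pv_getD_insNil rows PySem.Dict.empty (by intro q hq; cases hq) n
  rw [h1, h2, List.nil_append]

-- ===== VERDICT (by name: the statement is the Claim_ definition above) =====
theorem collect_removed_neurons_layer_wise_without_val_spec : Claim_equal_collect_removed_neurons_layer_wise_without_val := by
  intro si removeNum layerNames _ _
  unfold Spec_collect_removed_neurons_layer_wise_without_val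
  unfold collect_removed_neurons_layer_wise_without_val collect_removed_neurons_layer_wise_without_val_alt
  dsimp only
  rw [pv_fold_filterMap]
  rw [pv_split]
  rw [pv_insAbs_eq _ PySem.Dict.empty (by intro q hq; cases hq)]
  have htaken : (if (0 : Int) < removeNum
        then PySem.List.slice (si.filterMap
          (fun (t : Int × Int × Int) =>
            if PySem.Str.endswith (pvNameAt layerNames t.1) "lm_head"
                || PySem.Str.endswith (pvNameAt layerNames t.1) "embed_out" then none
            else some (pvNameAt layerNames t.1, t.2.1))) none (some removeNum) else [])
      = (si.filterMap
          (fun (t : Int × Int × Int) =>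
            if PySem.Str.endswith (pvNameAt layerNames t.1) "lm_head"
                || PySem.Str.endswith (pvNameAt layerNames t.1) "embed_out" then none
            else some (pvNameAt layerNames t.1, t.2.1))).take (removeNum - 0).toNat := by
    by_cases h : (0 : Int) < removeNum
    · rw [if_pos h, PySem.List.slice_to _ (le_of_lt h)]
      congr 1
      omega
    · rw [if_neg h]
      rw [show (removeNum - 0).toNat = 0 by omega, List.take_zero]
  rw [htaken]
  exact pv_main _ _
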